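-- pv_equiv track=rewrite | github.com/981377660LMT/algorithm-study | 11_动态规划/dp分类/双字符dp/将字符串编辑为两个相等字符串的最少操作数.py | solve
-- ===== SOURCE A (Python) =====
-- def solve(s):
--     def countEditDist(s1, s2) -> int:
--         """编辑距离+枚举分割点"""
--         n1, n2 = len(s1), len(s2)
--         dp = [[0] * (n2 + 1) for _ in range(n1 + 1)]
--         for i in range(n1 + 1):
--             dp[i][0] = i
--         for j in range(n2 + 1):
--             dp[0][j] = j
--
--         for i in range(1, n1 + 1):
--             for j in range(1, n2 + 1):
--                 if s1[i - 1] == s2[j - 1]: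
--                     dp[i][j] = dp[i - 1][j - 1]
--                 else:
--                     dp[i][j] = min(dp[i - 1][j], dp[i][j - 1], dp[i - 1][j - 1]) + 1
--
--         return dp[-1][-1]
--
--     res = len(s)
--     # 枚举分割点
--     for i in range(len(s)):
--         res = min(countEditDist(s[:i], s[i:]), res)
--     return res
-- ===== SOURCE B (Python) =====
-- def solve(s):
--     n = len(s)
--
--     def dist(s1, s2):
--         # top-down memoized recursion instead of a bottom-up table
--         memo = {}
--
--         def ed(p, q):
--             if p == 0:
--                 return q
--             if q == 0:
--                 return p
--             if (p, q) in memo: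
--                 return memo[(p, q)]
--             if s1[p - 1] == s2[q - 1]:
--                 r = ed(p - 1, q - 1)
--             else:
--                 r = 1 + min(ed(p - 1, q), ed(p, q - 1), ed(p - 1, q - 1))
--             memo[(p, q)] = r
--             return r
--
--         return ed(len(s1), len(s2))
--
--     return min([n] + [dist(s[:i], s[i:]) for i in range(n)])
-- ===== Notes on version B (the rewrite author's own statement) =====
-- stated objective: alternative
-- what changed: The inner edit distance is computed by a top-down memoized recursive function over the two index positions (a dict memo filled on demand) instead of A's bottom-up 2D table built by nested index loops, and the outer minimum over split points is taken with min() over a list instead of a running accumulator.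
import Mathlib
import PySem

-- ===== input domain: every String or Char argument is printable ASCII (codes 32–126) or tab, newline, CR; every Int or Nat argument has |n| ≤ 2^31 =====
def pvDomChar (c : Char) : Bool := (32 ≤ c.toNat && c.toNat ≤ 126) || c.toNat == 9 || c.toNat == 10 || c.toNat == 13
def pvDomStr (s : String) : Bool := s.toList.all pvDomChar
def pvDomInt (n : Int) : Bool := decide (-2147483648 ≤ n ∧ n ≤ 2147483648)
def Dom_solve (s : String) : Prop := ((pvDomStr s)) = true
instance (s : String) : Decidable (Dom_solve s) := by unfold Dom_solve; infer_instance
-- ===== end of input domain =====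

-- B computes each inner edit distance by a top-down memoized recursion on the two
-- index positions (dict memo) instead of A's bottom-up 2D table (objective: alternative).

-- ===== PORT A =====
-- countEditDist: bottom-up 2D table, literal transliteration
def cedA (s1 s2 : List Char) : Int :=
  let n1 := s1.length
  let n2 := s2.length
  let dp0 : List (List Int) :=
    (PySem.List.pyRange 0 ((n1 : Int) + 1)).map (fun _ => List.replicate (n2 + 1) (0 : Int))
  let dp1 := (PySem.List.pyRange 0 ((n1 : Int) + 1)).foldl
    (fun dp i => PySem.List.pySetD dp i (PySem.List.pySetD (PySem.List.pyGetD dp i []) 0 i)) dp0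
  let dp2 := (PySem.List.pyRange 0 ((n2 : Int) + 1)).foldl
    (fun dp j => PySem.List.pySetD dp 0 (PySem.List.pySetD (PySem.List.pyGetD dp 0 []) j j)) dp1
  let dp3 := (PySem.List.pyRange 1 ((n1 : Int) + 1)).foldl (fun dp i =>
    (PySem.List.pyRange 1 ((n2 : Int) + 1)).foldl (fun dp j =>
      let v : Int :=
        if PySem.List.pyGet? s1 (i - 1) = PySem.List.pyGet? s2 (j - 1) then
          PySem.List.pyGetD (PySem.List.pyGetD dp (i - 1) []) (j - 1) 0
        else
          min (min (PySem.List.pyGetD (PySem.List.pyGetD dp (i - 1) []) j 0)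
                   (PySem.List.pyGetD (PySem.List.pyGetD dp i []) (j - 1) 0))
              (PySem.List.pyGetD (PySem.List.pyGetD dp (i - 1) []) (j - 1) 0) + 1
      PySem.List.pySetD dp i (PySem.List.pySetD (PySem.List.pyGetD dp i []) j v)) dp) dp2
  PySem.List.pyGetD (PySem.List.pyGetD dp3 (-1) []) (-1) 0

def solve (s : String) : Int :=
  let cs := s.toList
  (PySem.List.pyRange 0 (cs.length : Int)).foldl
    (fun res i =>
      min (cedA (PySem.List.slice cs none (some i)) (PySem.List.slice cs (some i) none)) res)
    (cs.length : Int)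

-- ===== PORT B =====
-- ed(p, q) with a dict memo, transliterated: memo threaded through the calls in
-- Python's evaluation order; the (p, q) key is the Int pair Python hashes.
def edB (s1 s2 : List Char) : Nat → Nat → PySem.Dict (Int × Int) Int → Int × PySem.Dict (Int × Int) Int
  | 0, q, m => ((q : Int), m)
  | p + 1, 0, m => ((p : Int) + 1, m)
  | p + 1, q + 1, m =>
    match PySem.Dict.get? m ((p : Int) + 1, (q : Int) + 1) with
    | some v => (v, m)
    | none =>
      let pr : Int × PySem.Dict (Int × Int) Int :=
        if s1[p]? = s2[q]? then edB s1 s2 p q m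
        else
          let r1 := edB s1 s2 p (q + 1) m
          let r2 := edB s1 s2 (p + 1) q r1.2
          let r3 := edB s1 s2 p q r2.2
          (1 + min (min r1.1 r2.1) r3.1, r3.2)
      (pr.1, PySem.Dict.insert pr.2 ((p : Int) + 1, (q : Int) + 1) pr.1)
termination_by p q _ => p + q
decreasing_by all_goals omega

def distB (s1 s2 : List Char) : Int :=
  (edB s1 s2 s1.length s2.length PySem.Dict.empty).1

def solve_alt (s : String) : Int :=
  let cs := s.toList
  (PySem.List.min?
    ([(cs.length : Int)] ++ (PySem.List.pyRange 0 (cs.length : Int)).map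
      (fun i => distB (PySem.List.slice cs none (some i)) (PySem.List.slice cs (some i) none)))
    (fun x => x)).getD 0

-- ===== PRECONDITION & SPEC =====
def Spec_solve (s : String) (out : Int) : Prop := out = solve_alt s
instance (s : String) (out : Int) : Decidable (Spec_solve s out) := by unfold Spec_solve; infer_instance

-- ===== CLAIM (what is proved, stated in full; the proofs are below) =====
def Claim_equal_solve : Prop := ∀ (s : String), Dom_solve s → Spec_solve s (solve s)

-- ===== LEMMAS AND PROOFS =====

-- the common reference value: edit distance of first i chars of s1 and first j chars of s2
def ed (s1 s2 : List Char) : Nat → Nat → Int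
  | 0, j => (j : Int)
  | i + 1, 0 => ((i : Int) + 1)
  | i + 1, j + 1 =>
    if s1[i]? = s2[j]? then ed s1 s2 i j
    else min (min (ed s1 s2 i (j + 1)) (ed s1 s2 (i + 1) j)) (ed s1 s2 i j) + 1
termination_by i j => i + j
decreasing_by all_goals omega

@[simp] theorem ed_zero_left (s1 s2 : List Char) (j : Nat) : ed s1 s2 0 j = (j : Int) := by
  cases j <;> simp [ed]

@[simp] theorem ed_zero_right (s1 s2 : List Char) (i : Nat) : ed s1 s2 i 0 = (i : Int) := by
  cases i <;> simp [ed]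

theorem ed_succ_succ (s1 s2 : List Char) (i j : Nat) :
    ed s1 s2 (i + 1) (j + 1) =
      if s1[i]? = s2[j]? then ed s1 s2 i j
      else min (min (ed s1 s2 i (j + 1)) (ed s1 s2 (i + 1) j)) (ed s1 s2 i j) + 1 := by
  rw [ed]

def rowSpec (s1 s2 : List Char) (i : Nat) : List Int :=
  (List.range (s2.length + 1)).map (fun j => ed s1 s2 i j)

theorem getD_map_range {α : Type} (f : Nat → α) (n k : Nat) (h : k < n) (d : α) :
    ((List.range n).map f).getD k d = f k := by
  rw [List.getD_eq_getElem _ _ (by simpa using h)]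
  simp

theorem rowSpec_last (s1 s2 : List Char) (i : Nat) :
    PySem.List.pyGetD (rowSpec s1 s2 i) (-1) 0 = ed s1 s2 i s2.length := by
  rw [rowSpec, List.range_succ, List.map_append]
  exact PySem.List.pyGetD_neg_one_append_singleton _ _ _

-- ---- B-side: the memo invariant ----

-- every entry of the memo is already a correct edit-distance value
def GoodB (s1 s2 : List Char) (m : PySem.Dict (Int × Int) Int) : Prop :=
  ∀ (p q : Nat) (v : Int), PySem.Dict.get? m ((p : Int), (q : Int)) = some v → v = ed s1 s2 p q

theorem goodB_empty (s1 s2 : List Char) : GoodB s1 s2 PySem.Dict.empty := by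
  intro p q v h
  rw [PySem.Dict.get?_empty] at h
  exact absurd h (by simp)

theorem goodB_insert (s1 s2 : List Char) (m : PySem.Dict (Int × Int) Int)
    (hm : GoodB s1 s2 m) (a b : Nat) (v : Int) (hv : v = ed s1 s2 a b) :
    GoodB s1 s2 (PySem.Dict.insert m ((a : Int), (b : Int)) v) := by
  intro p q w h
  rw [PySem.Dict.get?_insert] at h
  by_cases hk : ((p : Int), (q : Int)) = ((a : Int), (b : Int))
  · obtain ⟨hk1, hk2⟩ := Prod.mk.injEq .. ▸ hk
    have hp : p = a := by exact_mod_cast hk1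
    have hq : q = b := by exact_mod_cast hk2
    rw [if_pos hk] at h
    cases h
    rw [hp, hq]; exact hv
  · rw [if_neg hk] at h
    exact hm p q w h

theorem edB_correct (s1 s2 : List Char) :
    ∀ (n p q : Nat) (m : PySem.Dict (Int × Int) Int), p + q ≤ n → GoodB s1 s2 m →
      (edB s1 s2 p q m).1 = ed s1 s2 p q ∧ GoodB s1 s2 (edB s1 s2 p q m).2 := by
  intro n
  induction n with
  | zero =>
    intro p q m hb hg
    have hp : p = 0 := by omega
    have hq : q = 0 := by omega
    subst hp; subst hq
    simp [edB, hg]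
  | succ n ih =>
    intro p q m hb hg
    match p, q with
    | 0, q => simp [edB, hg]
    | p + 1, 0 => simp [edB, hg]
    | p + 1, q + 1 =>
      rw [edB]
      cases hmk : PySem.Dict.get? m ((p : Int) + 1, (q : Int) + 1) with
      | some v =>
        simp only
        constructor
        · have := hg (p + 1) (q + 1) v (by push_cast; exact hmk)
          simpa using this
        · exact hg
      | none =>
        simp only
        by_cases hc : s1[p]? = s2[q]?
        · rw [if_pos hc]
          obtain ⟨hv, hgood⟩ := ih p q m (by omega) hg
          refine ⟨?_, ?_⟩
          · simp only [hv, ed_succ_succ, if_pos hc]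
          · have : (edB s1 s2 p q m).1 = ed s1 s2 (p + 1) (q + 1) := by
              rw [hv, ed_succ_succ, if_pos hc]
            have h2 := goodB_insert s1 s2 (edB s1 s2 p q m).2 hgood (p + 1) (q + 1) _ this
            simpa using h2
        · rw [if_neg hc]
          obtain ⟨hv1, hg1⟩ := ih p (q + 1) m (by omega) hg
          obtain ⟨hv2, hg2⟩ := ih (p + 1) q _ (by omega) hg1
          obtain ⟨hv3, hg3⟩ := ih p q _ (by omega) hg2
          have hval : 1 + min (min (edB s1 s2 p (q + 1) m).1
                (edB s1 s2 (p + 1) q (edB s1 s2 p (q + 1) m).2).1)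
                (edB s1 s2 p q (edB s1 s2 (p + 1) q (edB s1 s2 p (q + 1) m).2).2).1
              = ed s1 s2 (p + 1) (q + 1) := by
            rw [hv1, hv2, hv3, ed_succ_succ, if_neg hc]
            ring
          refine ⟨by simpa using hval, ?_⟩
          have h2 := goodB_insert s1 s2 _ hg3 (p + 1) (q + 1) _ hval
          simpa using h2

theorem distB_eq_ed (s1 s2 : List Char) : distB s1 s2 = ed s1 s2 s1.length s2.length := by
  exact (edB_correct s1 s2 (s1.length + s2.length) s1.length s2.length PySem.Dict.empty
    (by omega) (goodB_empty s1 s2)).1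

-- ---- A-side ----

def padR (n2 i : Nat) : List Int := ((i : Int)) :: List.replicate n2 0

def natRow : Nat → List Int
  | 0 => []
  | n + 1 => natRow n ++ [(n : Int)]

theorem natRow_eq : ∀ n : Nat, natRow n = (List.range n).map (fun j => ((j : Nat) : Int))
  | 0 => rfl
  | n + 1 => by
    rw [List.range_succ, List.map_append, ← natRow_eq n]
    rfl

def tblTail (n2 b c : Nat) : List (List Int) := (List.range c).map (fun t => padR n2 (b + t))

def partR (s1 s2 : List Char) (i jm : Nat) : List Int :=
  (List.range (jm + 1)).map (fun j => ed s1 s2 i j) ++ List.replicate (s2.length - jm) 0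

theorem tblTail_succ (n2 b c : Nat) :
    tblTail n2 b (c + 1) = padR n2 b :: tblTail n2 (b + 1) c := by
  rw [tblTail, List.range_succ_eq_map, List.map_cons, List.map_map]
  refine congrArg₂ _ (by simp) ?_
  rw [tblTail]
  exact List.map_congr_left (fun t _ => by simp only [Function.comp_apply]; congr 1; omega)

theorem stage1 (s1 s2 : List Char) :
    ∀ (d m : Nat), m + d = s1.length + 1 →
    (PySem.List.pyRange (m : Int) ((s1.length : Int) + 1)).foldl
      (fun dp i => PySem.List.pySetD dp i (PySem.List.pySetD (PySem.List.pyGetD dp i []) 0 i))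
      ((List.range m).map (padR s2.length) ++ List.replicate d (List.replicate (s2.length + 1) (0 : Int)))
    = (List.range (s1.length + 1)).map (padR s2.length) := by
  intro d
  induction d with
  | zero =>
    intro m hm
    have hm' : m = s1.length + 1 := by omega
    subst hm'
    rw [PySem.List.pyRange_one_eq_nil (by omega), List.foldl_nil, List.replicate_zero,
        List.append_nil]
  | succ d ih =>
    intro m hm
    have hms : (m : Int) < (s1.length : Int) + 1 := by omega
    rw [PySem.List.pyRange_one_cons hms, List.foldl_cons]
    have hget : PySem.List.pyGetD
        ((List.range m).map (padR s2.length) ++ List.replicate (d + 1) (List.replicate (s2.length + 1) (0 : Int)))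
        (m : Int) [] = List.replicate (s2.length + 1) (0 : Int) := by
      rw [PySem.List.pyGetD_natCast, List.getD_append_right _ _ _ _ (by simp),
          List.length_map, List.length_range, Nat.sub_self]
      exact List.getD_replicate _ (by omega)
    rw [hget]
    have hrow : PySem.List.pySetD (List.replicate (s2.length + 1) (0 : Int)) 0 (m : Int)
        = padR s2.length m := by
      rw [PySem.List.pySetD_of_nonneg (h := by norm_num), Int.toNat_zero,
          List.replicate_succ, List.set_cons_zero, padR]
    rw [hrow]
    have hset : PySem.List.pySetD
        ((List.range m).map (padR s2.length) ++ List.replicate (d + 1) (List.replicate (s2.length + 1) (0 : Int)))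
        (m : Int) (padR s2.length m)
        = (List.range (m + 1)).map (padR s2.length) ++ List.replicate d (List.replicate (s2.length + 1) (0 : Int)) := by
      rw [PySem.List.pySetD_natCast, List.set_append_right _ _ (by simp),
          List.length_map, List.length_range, Nat.sub_self, List.replicate_succ,
          List.set_cons_zero, List.range_succ, List.map_append]
      simp
    rw [hset]
    have hc : (m : Int) + 1 = ((m + 1 : Nat) : Int) := by push_cast; ring
    rw [hc]
    exact ih (m + 1) (by omega)

theorem stage1_0 (s1 s2 : List Char) :
    (PySem.List.pyRange 0 ((s1.length : Int) + 1)).foldl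
      (fun dp i => PySem.List.pySetD dp i (PySem.List.pySetD (PySem.List.pyGetD dp i []) 0 i))
      (List.replicate (s1.length + 1) (List.replicate (s2.length + 1) (0 : Int)))
    = (List.range (s1.length + 1)).map (padR s2.length) := by
  have h := stage1 s1 s2 (s1.length + 1) 0 (by omega)
  simp only [Nat.cast_zero, List.range_zero, List.map_nil, List.nil_append] at h
  exact h

theorem stage2 (s2' : List Char) (rest : List (List Int)) :
    ∀ (d j : Nat), j + d = s2'.length + 1 →
    (PySem.List.pyRange (j : Int) ((s2'.length : Int) + 1)).foldl
      (fun dp j => PySem.List.pySetD dp 0 (PySem.List.pySetD (PySem.List.pyGetD dp 0 []) j j))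
      ((natRow j ++ List.replicate d (0 : Int)) :: rest)
    = natRow (s2'.length + 1) :: rest := by
  intro d
  induction d with
  | zero =>
    intro j hj
    have hj' : j = s2'.length + 1 := by omega
    subst hj'
    rw [PySem.List.pyRange_one_eq_nil (by omega), List.foldl_nil, List.replicate_zero,
        List.append_nil]
  | succ d ih =>
    intro j hj
    have hjs : (j : Int) < (s2'.length : Int) + 1 := by omega
    rw [PySem.List.pyRange_one_cons hjs, List.foldl_cons]
    have hget : PySem.List.pyGetD ((natRow j ++ List.replicate (d + 1) (0 : Int)) :: rest) 0 []
        = natRow j ++ List.replicate (d + 1) (0 : Int) :=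
      PySem.List.pyGetD_zero_cons _ _ _
    rw [hget]
    have hlen : (natRow j).length = j := by rw [natRow_eq]; simp
    have hrow : PySem.List.pySetD (natRow j ++ List.replicate (d + 1) (0 : Int)) (j : Int) (j : Int)
        = natRow (j + 1) ++ List.replicate d (0 : Int) := by
      rw [PySem.List.pySetD_natCast, List.set_append_right _ _ (by omega), hlen,
          Nat.sub_self, List.replicate_succ, List.set_cons_zero,
          show natRow j ++ ((j : Int)) :: List.replicate d (0 : Int)
              = (natRow j ++ [((j : Int))]) ++ List.replicate d (0 : Int) by simp,
          show natRow j ++ [((j : Int))] = natRow (j + 1) from rfl]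
    rw [hrow]
    have hset : PySem.List.pySetD ((natRow j ++ List.replicate (d + 1) (0 : Int)) :: rest) 0
        (natRow (j + 1) ++ List.replicate d (0 : Int))
        = (natRow (j + 1) ++ List.replicate d (0 : Int)) :: rest := by
      rw [PySem.List.pySetD_of_nonneg (h := by norm_num), Int.toNat_zero, List.set_cons_zero]
    rw [hset]
    have hc : (j : Int) + 1 = ((j + 1 : Nat) : Int) := by push_cast; ring
    rw [hc]
    exact ih (j + 1) (by omega)

theorem stage2_0 (s2' : List Char) (rest : List (List Int)) :
    (PySem.List.pyRange 0 ((s2'.length : Int) + 1)).foldl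
      (fun dp j => PySem.List.pySetD dp 0 (PySem.List.pySetD (PySem.List.pyGetD dp 0 []) j j))
      ((List.replicate (s2'.length + 1) (0 : Int)) :: rest)
    = natRow (s2'.length + 1) :: rest := by
  have h := stage2 s2' rest (s2'.length + 1) 0 (by omega)
  simp only [Nat.cast_zero, show natRow 0 = [] from rfl, List.nil_append] at h
  exact h

theorem A_inner (s1 s2 : List Char) (m : Nat) (_hm : m < s1.length) :
    ∀ (d jm : Nat), jm + d = s2.length →
    (PySem.List.pyRange ((jm : Int) + 1) ((s2.length : Int) + 1)).foldl
      (fun dp j =>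
        let v : Int :=
          if PySem.List.pyGet? s1 ((m : Int) + 1 - 1) = PySem.List.pyGet? s2 (j - 1) then
            PySem.List.pyGetD (PySem.List.pyGetD dp ((m : Int) + 1 - 1) []) (j - 1) 0
          else
            min (min (PySem.List.pyGetD (PySem.List.pyGetD dp ((m : Int) + 1 - 1) []) j 0)
                     (PySem.List.pyGetD (PySem.List.pyGetD dp ((m : Int) + 1) []) (j - 1) 0))
                (PySem.List.pyGetD (PySem.List.pyGetD dp ((m : Int) + 1 - 1) []) (j - 1) 0) + 1
        PySem.List.pySetD dp ((m : Int) + 1)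
          (PySem.List.pySetD (PySem.List.pyGetD dp ((m : Int) + 1) []) j v))
      ((List.range (m + 1)).map (rowSpec s1 s2) ++ partR s1 s2 (m + 1) jm :: tblTail s2.length (m + 2) (s1.length - m - 1))
    = (List.range (m + 1)).map (rowSpec s1 s2) ++ rowSpec s1 s2 (m + 1) :: tblTail s2.length (m + 2) (s1.length - m - 1) := by
  intro d
  induction d with
  | zero =>
    intro jm hjm
    have hjm' : jm = s2.length := by omega
    subst hjm'
    rw [PySem.List.pyRange_one_eq_nil (by omega), List.foldl_nil]
    have : partR s1 s2 (m + 1) s2.length = rowSpec s1 s2 (m + 1) := by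
      rw [partR, Nat.sub_self, List.replicate_zero, List.append_nil, rowSpec]
    rw [this]
  | succ d ih =>
    intro jm hjm
    have hjs : jm < s2.length := by omega
    rw [PySem.List.pyRange_one_cons (a := (jm : Int) + 1) (by omega)]
    simp only [List.foldl_cons]
    have hjc : ((jm : Int) + 1 - 1) = ((jm : Nat) : Int) := by ring
    have hjc1 : ((jm : Int) + 1) = ((jm + 1 : Nat) : Int) := by push_cast; ring
    have hmc : ((m : Int) + 1 - 1) = ((m : Nat) : Int) := by ring
    have hmc1 : ((m : Int) + 1) = ((m + 1 : Nat) : Int) := by push_cast; ring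
    have hgetm : PySem.List.pyGetD
        ((List.range (m + 1)).map (rowSpec s1 s2) ++ partR s1 s2 (m + 1) jm :: tblTail s2.length (m + 2) (s1.length - m - 1))
        ((m : Int) + 1 - 1) [] = rowSpec s1 s2 m := by
      rw [hmc, PySem.List.pyGetD_natCast, List.getD_append _ _ _ _ (by simp)]
      exact getD_map_range _ _ _ (by omega) _
    have hgetm1 : PySem.List.pyGetD
        ((List.range (m + 1)).map (rowSpec s1 s2) ++ partR s1 s2 (m + 1) jm :: tblTail s2.length (m + 2) (s1.length - m - 1))
        ((m : Int) + 1) [] = partR s1 s2 (m + 1) jm := by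
      rw [hmc1, PySem.List.pyGetD_natCast, List.getD_append_right _ _ _ _ (by simp)]
      simp
    rw [hgetm, hgetm1]
    have hup : PySem.List.pyGetD (rowSpec s1 s2 m) ((jm : Int) + 1) 0 = ed s1 s2 m (jm + 1) := by
      rw [hjc1, PySem.List.pyGetD_natCast, rowSpec]
      exact getD_map_range _ _ _ (by omega) _
    have hdiag : PySem.List.pyGetD (rowSpec s1 s2 m) ((jm : Int) + 1 - 1) 0 = ed s1 s2 m jm := by
      rw [hjc, PySem.List.pyGetD_natCast, rowSpec]
      exact getD_map_range _ _ _ (by omega) _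
    have hleft : PySem.List.pyGetD (partR s1 s2 (m + 1) jm) ((jm : Int) + 1 - 1) 0 = ed s1 s2 (m + 1) jm := by
      rw [hjc, PySem.List.pyGetD_natCast, partR, List.getD_append _ _ _ _ (by simp)]
      exact getD_map_range _ _ _ (by omega) _
    have hcond : PySem.List.pyGet? s2 ((jm : Int) + 1 - 1) = s2[jm]? := by
      rw [hjc, PySem.List.pyGet?_natCast]
    rw [hup, hdiag, hleft, hcond]
    have hval : (if PySem.List.pyGet? s1 ((m : Int) + 1 - 1) = s2[jm]? then ed s1 s2 m jm
        else min (min (ed s1 s2 m (jm + 1)) (ed s1 s2 (m + 1) jm)) (ed s1 s2 m jm) + 1)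
        = ed s1 s2 (m + 1) (jm + 1) := by
      rw [hmc, PySem.List.pyGet?_natCast]
      exact (ed_succ_succ s1 s2 m jm).symm
    rw [hval]
    have hnewrow : PySem.List.pySetD (partR s1 s2 (m + 1) jm) ((jm : Int) + 1) (ed s1 s2 (m + 1) (jm + 1))
        = partR s1 s2 (m + 1) (jm + 1) := by
      rw [hjc1, PySem.List.pySetD_natCast, partR, List.set_append_right _ _ (by simp),
          List.length_map, List.length_range, Nat.sub_self,
          show s2.length - jm = (s2.length - (jm + 1)) + 1 by omega,
          List.replicate_succ, List.set_cons_zero, partR]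
      rw [List.range_succ (n := jm + 1), List.map_append]
      simp
    rw [hnewrow]
    have hsettbl : PySem.List.pySetD
        ((List.range (m + 1)).map (rowSpec s1 s2) ++ partR s1 s2 (m + 1) jm :: tblTail s2.length (m + 2) (s1.length - m - 1))
        ((m : Int) + 1) (partR s1 s2 (m + 1) (jm + 1))
        = (List.range (m + 1)).map (rowSpec s1 s2) ++ partR s1 s2 (m + 1) (jm + 1) :: tblTail s2.length (m + 2) (s1.length - m - 1) := by
      rw [hmc1, PySem.List.pySetD_natCast, List.set_append_right _ _ (by simp),
          List.length_map, List.length_range, Nat.sub_self]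
      simp
    rw [hsettbl]
    rw [show ((jm : Int) + 1 + 1) = ((jm + 1 : Nat) : Int) + 1 by push_cast; ring]
    exact ih (jm + 1) (by omega)

theorem A_inner0 (s1 s2 : List Char) (m : Nat) (_hm : m < s1.length) :
    (PySem.List.pyRange 1 ((s2.length : Int) + 1)).foldl
      (fun dp j =>
        let v : Int :=
          if PySem.List.pyGet? s1 ((m : Int) + 1 - 1) = PySem.List.pyGet? s2 (j - 1) then
            PySem.List.pyGetD (PySem.List.pyGetD dp ((m : Int) + 1 - 1) []) (j - 1) 0
          else
            min (min (PySem.List.pyGetD (PySem.List.pyGetD dp ((m : Int) + 1 - 1) []) j 0)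
                     (PySem.List.pyGetD (PySem.List.pyGetD dp ((m : Int) + 1) []) (j - 1) 0))
                (PySem.List.pyGetD (PySem.List.pyGetD dp ((m : Int) + 1 - 1) []) (j - 1) 0) + 1
        PySem.List.pySetD dp ((m : Int) + 1)
          (PySem.List.pySetD (PySem.List.pyGetD dp ((m : Int) + 1) []) j v))
      ((List.range (m + 1)).map (rowSpec s1 s2) ++ partR s1 s2 (m + 1) 0 :: tblTail s2.length (m + 2) (s1.length - m - 1))
    = (List.range (m + 1)).map (rowSpec s1 s2) ++ rowSpec s1 s2 (m + 1) :: tblTail s2.length (m + 2) (s1.length - m - 1) := by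
  have h := A_inner s1 s2 m _hm s2.length 0 (by omega)
  simp only [Nat.cast_zero, zero_add] at h
  exact h

theorem A_outer (s1 s2 : List Char) :
    ∀ (d m : Nat), m + d = s1.length →
    (PySem.List.pyRange ((m : Int) + 1) ((s1.length : Int) + 1)).foldl
      (fun dp i =>
        (PySem.List.pyRange 1 ((s2.length : Int) + 1)).foldl (fun dp j =>
          let v : Int :=
            if PySem.List.pyGet? s1 (i - 1) = PySem.List.pyGet? s2 (j - 1) then
              PySem.List.pyGetD (PySem.List.pyGetD dp (i - 1) []) (j - 1) 0
            else
              min (min (PySem.List.pyGetD (PySem.List.pyGetD dp (i - 1) []) j 0)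
                       (PySem.List.pyGetD (PySem.List.pyGetD dp i []) (j - 1) 0))
                  (PySem.List.pyGetD (PySem.List.pyGetD dp (i - 1) []) (j - 1) 0) + 1
          PySem.List.pySetD dp i (PySem.List.pySetD (PySem.List.pyGetD dp i []) j v)) dp)
      ((List.range (m + 1)).map (rowSpec s1 s2) ++ tblTail s2.length (m + 1) (s1.length - m))
    = (List.range (s1.length + 1)).map (rowSpec s1 s2) := by
  intro d
  induction d with
  | zero =>
    intro m hm
    have hm' : m = s1.length := by omega
    subst hm'
    rw [show PySem.List.pyRange ((s1.length : Int) + 1) ((s1.length : Int) + 1) = []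
        from PySem.List.pyRange_one_eq_nil (by omega), List.foldl_nil, Nat.sub_self]
    rw [tblTail, List.range_zero, List.map_nil, List.append_nil]
  | succ d ih =>
    intro m hm
    have hms : m < s1.length := by omega
    rw [show PySem.List.pyRange ((m : Int) + 1) ((s1.length : Int) + 1)
        = ((m : Int) + 1) :: PySem.List.pyRange ((m : Int) + 1 + 1) ((s1.length : Int) + 1)
        from PySem.List.pyRange_one_cons (by omega)]
    simp only [List.foldl_cons]
    rw [show (List.range (m + 1)).map (rowSpec s1 s2) ++ tblTail s2.length (m + 1) (s1.length - m)
        = (List.range (m + 1)).map (rowSpec s1 s2) ++ partR s1 s2 (m + 1) 0 :: tblTail s2.length (m + 2) (s1.length - m - 1) by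
      congr 1
      have hgen : ∀ c : Nat, s1.length - m - 1 = c → s1.length - m = c + 1 →
          tblTail s2.length (m + 1) (s1.length - m)
          = partR s1 s2 (m + 1) 0 :: tblTail s2.length (m + 2) (s1.length - m - 1) := by
        intro c h2 h1
        rw [h2, h1, tblTail_succ,
            show partR s1 s2 (m + 1) 0 = padR s2.length (m + 1) by rw [partR, padR]; simp,
            show m + 1 + 1 = m + 2 from rfl]
      exact hgen (s1.length - m - 1) rfl (by omega)]
    rw [A_inner0 s1 s2 m hms]
    rw [show (List.range (m + 1)).map (rowSpec s1 s2) ++ rowSpec s1 s2 (m + 1) :: tblTail s2.length (m + 2) (s1.length - m - 1)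
        = (List.range (m + 1 + 1)).map (rowSpec s1 s2) ++ tblTail s2.length (m + 1 + 1) (s1.length - (m + 1)) by
      rw [List.range_succ (n := m + 1), List.map_append,
          show s1.length - (m + 1) = s1.length - m - 1 by omega]
      simp]
    rw [show (m : Int) + 1 + 1 = ((m + 1 : Nat) : Int) + 1 by push_cast; ring]
    exact ih (m + 1) (by omega)

theorem A_outer0 (s1 s2 : List Char) :
    (PySem.List.pyRange 1 ((s1.length : Int) + 1)).foldl
      (fun dp i =>
        (PySem.List.pyRange 1 ((s2.length : Int) + 1)).foldl (fun dp j =>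
          let v : Int :=
            if PySem.List.pyGet? s1 (i - 1) = PySem.List.pyGet? s2 (j - 1) then
              PySem.List.pyGetD (PySem.List.pyGetD dp (i - 1) []) (j - 1) 0
            else
              min (min (PySem.List.pyGetD (PySem.List.pyGetD dp (i - 1) []) j 0)
                       (PySem.List.pyGetD (PySem.List.pyGetD dp i []) (j - 1) 0))
                  (PySem.List.pyGetD (PySem.List.pyGetD dp (i - 1) []) (j - 1) 0) + 1
          PySem.List.pySetD dp i (PySem.List.pySetD (PySem.List.pyGetD dp i []) j v)) dp)
      ([rowSpec s1 s2 0] ++ tblTail s2.length 1 s1.length)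
    = (List.range (s1.length + 1)).map (rowSpec s1 s2) := by
  have h := A_outer s1 s2 s1.length 0 (by omega)
  simp only [Nat.cast_zero, zero_add, Nat.sub_zero, List.range_one, List.map_cons,
    List.map_nil] at h
  exact h

theorem cedA_eq_ed (s1 s2 : List Char) : cedA s1 s2 = ed s1 s2 s1.length s2.length := by
  simp only [cedA]
  rw [show (PySem.List.pyRange 0 ((s1.length : Int) + 1)).map (fun _ => List.replicate (s2.length + 1) (0 : Int))
      = List.replicate (s1.length + 1) (List.replicate (s2.length + 1) (0 : Int)) by
    rw [List.map_const', PySem.List.length_pyRange_one]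
    congr 1]
  rw [stage1_0 s1 s2]
  rw [show (List.range (s1.length + 1)).map (padR s2.length)
      = (List.replicate (s2.length + 1) (0 : Int)) :: (List.range s1.length).map (fun t => padR s2.length (Nat.succ t)) by
    rw [List.range_succ_eq_map, List.map_cons, List.map_map]
    congr 1]
  rw [stage2_0 s2 ((List.range s1.length).map (fun t => padR s2.length (Nat.succ t)))]
  rw [show natRow (s2.length + 1) :: (List.range s1.length).map (fun t => padR s2.length (Nat.succ t))
      = [rowSpec s1 s2 0] ++ tblTail s2.length 1 s1.length by
    rw [List.singleton_append]
    congr 1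
    · rw [natRow_eq, rowSpec]
      exact (List.map_congr_left (fun j _ => by simp)).symm
    · rw [tblTail]
      exact List.map_congr_left (fun t _ => by congr 1; omega)]
  rw [A_outer0 s1 s2]
  rw [show PySem.List.pyGetD ((List.range (s1.length + 1)).map (rowSpec s1 s2)) (-1) [] = rowSpec s1 s2 s1.length by
    rw [List.range_succ, List.map_append]
    exact PySem.List.pyGetD_neg_one_append_singleton _ _ _]
  exact rowSpec_last s1 s2 s1.length

-- ---- outer loops ----

theorem foldl_min_flip (l : List Int) : ∀ a : Int,
    l.foldl (fun r x => min x r) a = l.foldl min a := by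
  induction l with
  | nil => intro a; rfl
  | cons x l ih =>
    intro a
    simp only [List.foldl_cons]
    rw [ih, min_comm x a]

theorem min?_cons_getD (a : Int) (l : List Int) :
    (PySem.List.min? (a :: l) (fun x => x)).getD 0 = l.foldl (fun r x => min x r) a := by
  rw [PySem.List.min?_id_cons, Option.getD_some, foldl_min_flip]

-- ===== VERDICT (by name: the statement is the Claim_ definition above) =====
theorem solve_spec : Claim_equal_solve := by
  intro s _
  simp only [Spec_solve, solve, solve_alt]
  simp only [List.singleton_append, min?_cons_getD, List.foldl_map]
  simp only [cedA_eq_ed, distB_eq_ed]
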